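-- pv_equiv track=rewrite | github.com/xidchen/beta_data | ner_with_bert_zh.py | ner_entity_to_tagging
-- ===== SOURCE A (Python) =====
-- def strip_whitespace(_ents: [[int, int, str]], _ws: [int]) -> []:
--     """Strip whitespace if entities have any on either ends"""
--     for _ent in _ents:
--         for _i in range(_ent[0], _ent[1] - 1, 1):
--             if _i in _ws:
--                 _ent[0] += 1
--             else:
--                 break
--         for _i in range(_ent[1] - 1, _ent[0], -1):
--             if _i in _ws:
--                 _ent[1] -= 1
--             else:
--                 break
--     return _ents
--
-- def ner_entity_to_tagging(_text: str,
--                           _entities: [[int, int, str]],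
--                           _tokens: [str],
--                           _scheme: str) -> [str]:
--     """BERT NER, transform offsets to tagging
--     _text: the original text
--     _entities: the start offset, end offset, and name of entities
--     _tokens: BERT tokenized tokens
--     _scheme: tagging scheme ('IO', 'IOB', 'BILUO')
--     """
--     res = []
--     whitespaces = [i for i, _t in enumerate(_text) if _t == ' ']
--     _entities = [list(_entity) for _entity in _entities]
--     _e = sorted(strip_whitespace(_entities, whitespaces))
--     _t_start = 0
--     while whitespaces and _t_start == whitespaces[0]:
--         _t_start += 1
--         whitespaces.pop(0)
--
--     def extend_end(_end: int, _idx: int) -> int: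
--         """Return end position of continuous token given that of current one
--         _end: end position of current token
--         _idx: index of current token"""
--         for _i in range(_idx + 1, len(_tokens)):
--             if _tokens[_i].startswith('##'):
--                 _end += len(_tokens[_i][2:])
--             else:
--                 break
--         return _end
--
--     for i, _t in enumerate(_tokens):
--         if _t.startswith('##'):
--             _t_end = _t_start + len(_t[2:])
--             res.append('X')
--         else:
--             _t_end = _t_start + len(_t)
--             if _scheme == 'IO':
--                 if not _e or _t_start < _e[0][0]:
--                     res.append('O')
--                 elif _t_start >= _e[0][0] and extend_end(_t_end, i) < _e[0][1]:
--                     res.append('I-' + _e[0][2])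
--                 elif _t_start >= _e[0][0] and extend_end(_t_end, i) == _e[0][1]:
--                     res.append('I-' + _e[0][2])
--                     _e.pop(0)
--             if _scheme == 'IOB':
--                 if not _e or _t_start < _e[0][0]:
--                     res.append('O')
--                 elif _t_start == _e[0][0] and extend_end(_t_end, i) < _e[0][1]:
--                     res.append('B-' + _e[0][2])
--                 elif _t_start > _e[0][0] and extend_end(_t_end, i) < _e[0][1]:
--                     res.append('I-' + _e[0][2])
--                 elif _t_start >= _e[0][0] and extend_end(_t_end, i) == _e[0][1]:
--                     res.append('I-' + _e[0][2])
--                     _e.pop(0)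
--             if _scheme == 'BILUO':
--                 if not _e or _t_start < _e[0][0]:
--                     res.append('O')
--                 elif _t_start == _e[0][0] and extend_end(_t_end, i) < _e[0][1]:
--                     res.append('B-' + _e[0][2])
--                 elif _t_start > _e[0][0] and extend_end(_t_end, i) < _e[0][1]:
--                     res.append('I-' + _e[0][2])
--                 elif _t_start > _e[0][0] and extend_end(_t_end, i) == _e[0][1]:
--                     res.append('L-' + _e[0][2])
--                     _e.pop(0)
--                 elif _t_start == _e[0][0] and extend_end(_t_end, i) == _e[0][1]:
--                     res.append('U-' + _e[0][2])
--                     _e.pop(0)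
--         while whitespaces and _t_end == whitespaces[0]:
--             _t_end += 1
--             whitespaces.pop(0)
--         _t_start = _t_end
--     return res
-- ===== SOURCE B (Python) =====
-- def ner_entity_to_tagging(_text, _entities, _tokens, _scheme):
--     """BERT NER, transform offsets to tagging (re-implementation).
--
--     Same result as the original: whitespace membership via a set, entity and
--     whitespace queues via index pointers instead of pop(0), and extend_end
--     replaced by suffix sums of '##'-token lengths computed once.
--     """
--     ws_sorted = [i for i, c in enumerate(_text) if c == ' ']
--     ws_set = set(ws_sorted)
--     ents = []
--     for s, e, name in _entities:
--         while s <= e - 2 and s in ws_set: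
--             s += 1
--         while e - 1 >= s + 1 and (e - 1) in ws_set:
--             e -= 1
--         ents.append((s, e, name))
--     ents.sort()
--     # ext[i] = total length contributed by the maximal run of '##'-tokens starting at i
--     ext = [0]
--     for t in reversed(_tokens):
--         ext.append(ext[-1] + len(t) - 2 if t.startswith('##') else 0)
--     ext.reverse()
--     known = _scheme in ('IO', 'IOB', 'BILUO')
--     res = []
--     wi = 0
--     ei = 0
--     t_start = 0
--     while wi < len(ws_sorted) and t_start == ws_sorted[wi]:
--         t_start += 1
--         wi += 1
--     for t, run_after in zip(_tokens, ext[1:]):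
--         if t.startswith('##'):
--             t_end = t_start + len(t) - 2
--             res.append('X')
--         else:
--             t_end = t_start + len(t)
--             if known:
--                 if ei == len(ents) or t_start < ents[ei][0]:
--                     res.append('O')
--                 else:
--                     s, e, name = ents[ei]
--                     full_end = t_end + run_after
--                     if full_end < e:
--                         if _scheme != 'IO' and t_start == s:
--                             res.append('B-' + name)
--                         else:
--                             res.append('I-' + name)
--                     elif full_end == e:
--                         if _scheme == 'BILUO':
--                             res.append(('U-' if t_start == s else 'L-') + name)
--                         else:
--                             res.append('I-' + name)
--                         ei += 1
--                     # full_end > e: no tag is emitted (as in the original)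
--         while wi < len(ws_sorted) and t_end == ws_sorted[wi]:
--             t_end += 1
--             wi += 1
--         t_start = t_end
--     return res
-- ===== Notes on version B (the rewrite author's own statement) =====
-- stated objective: alternative
-- what changed: Whitespace membership becomes a set and a moving index (no list scans, no pop(0)), the entity queue becomes an index pointer, extend_end is replaced by one backward pass of suffix sums over '##'-token lengths consumed in step with the token loop, and the three per-scheme branch chains are folded into one unified tag decision.
import Mathlib
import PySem

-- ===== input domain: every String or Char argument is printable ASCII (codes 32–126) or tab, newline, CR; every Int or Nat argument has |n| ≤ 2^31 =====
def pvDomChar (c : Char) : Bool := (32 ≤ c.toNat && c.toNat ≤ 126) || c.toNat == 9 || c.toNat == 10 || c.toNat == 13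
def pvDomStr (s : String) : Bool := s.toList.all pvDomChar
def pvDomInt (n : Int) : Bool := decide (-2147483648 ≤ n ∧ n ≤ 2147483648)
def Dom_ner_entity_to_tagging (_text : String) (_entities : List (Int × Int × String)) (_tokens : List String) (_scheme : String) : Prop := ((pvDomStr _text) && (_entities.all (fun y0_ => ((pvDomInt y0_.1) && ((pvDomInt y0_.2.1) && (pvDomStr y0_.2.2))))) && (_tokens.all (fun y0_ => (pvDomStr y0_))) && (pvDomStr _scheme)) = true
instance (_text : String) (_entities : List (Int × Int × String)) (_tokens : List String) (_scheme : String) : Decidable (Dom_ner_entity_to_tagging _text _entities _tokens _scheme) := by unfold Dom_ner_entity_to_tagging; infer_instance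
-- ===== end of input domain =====

-- B replaces A's list scans, pop(0) queues and per-call extend_end loop by a set,
-- index pointers and one backward suffix-sum pass (objective: alternative).

-- ===== PORT A =====
-- whitespaces = [i for i, _t in enumerate(_text) if _t == ' ']  (shared by both sources verbatim)
def pvWsOf (_text : String) : List Int :=
  ((PySem.List.enumerate _text.toList).filter (fun p => p.2 == ' ')).map (fun p => p.1)

-- Python's lexicographic comparison of (int, int, str) triples, used by sorted() in both sources
def pvEntLt (x y : Int × Int × String) : Bool :=
  x.1 < y.1 || (x.1 == y.1 && (x.2.1 < y.2.1 || (x.2.1 == y.2.1 && decide (x.2.2 < y.2.2))))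

-- sorted(entities): stable insertion sort (the shape of PySem.List.sorted_eq_foldl_insertBy)
def pvSortEnts (l : List (Int × Int × String)) : List (Int × Int × String) :=
  l.foldl (fun acc x => PySem.List.insertBy pvEntLt x acc) []

-- strip_whitespace, first loop: for _i in range(_ent[0], _ent[1] - 1, 1) with break
-- (i tracks the range variable, ent0 the mutated _ent[0]; early exit, so the range is never materialised)
def pvStripStartA (_ws : List Int) (ent0 i hi : Int) : Int :=
  if i < hi then
    if _ws.contains i then pvStripStartA _ws (ent0 + 1) (i + 1) hi else ent0
  else ent0
  termination_by (hi - i).toNat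
  decreasing_by omega

-- strip_whitespace, second loop: for _i in range(_ent[1] - 1, _ent[0], -1) with break
def pvStripEndA (_ws : List Int) (ent1 i lo : Int) : Int :=
  if lo < i then
    if _ws.contains i then pvStripEndA _ws (ent1 - 1) (i - 1) lo else ent1
  else ent1
  termination_by (i - lo).toNat
  decreasing_by omega

-- extend_end's loop body: for _i in range(_idx + 1, len(_tokens)) with break (j is _i)
def pvExtLoopA (_tokens : List String) (e : Int) (j : Nat) : Int :=
  if h : j < _tokens.length then
    if PySem.Chars.startswith (_tokens[j].toList) ['#', '#'] then
      pvExtLoopA _tokens (e + ((PySem.List.slice (_tokens[j].toList) (some 2) none).length : Int)) (j + 1)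
    else e
  else e
  termination_by _tokens.length - j

-- 'while whitespaces and x == whitespaces[0]: x += 1; whitespaces.pop(0)'  (both occurrences in A)
def pvSkipWsA (x : Int) (ws : List Int) : Int × List Int :=
  match ws with
  | [] => (x, [])
  | w :: rest => if x == w then pvSkipWsA (x + 1) rest else (x, w :: rest)

-- the 'if _scheme == 'IO'' block of A's loop body
def pvBlockIO (_tokens : List String) (i : Nat) (tstart tend : Int)
    (res : List String) (es : List (Int × Int × String)) : List String × List (Int × Int × String) :=
  match es with
  | [] => (res ++ ["O"], [])
  | (s, e2, nm) :: tl =>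
    if tstart < s then (res ++ ["O"], (s, e2, nm) :: tl)
    else if tstart ≥ s ∧ pvExtLoopA _tokens tend (i + 1) < e2 then
      (res ++ [String.ofList (['I', '-'] ++ nm.toList)], (s, e2, nm) :: tl)
    else if tstart ≥ s ∧ pvExtLoopA _tokens tend (i + 1) = e2 then
      (res ++ [String.ofList (['I', '-'] ++ nm.toList)], tl)
    else (res, (s, e2, nm) :: tl)

-- the 'if _scheme == 'IOB'' block
def pvBlockIOB (_tokens : List String) (i : Nat) (tstart tend : Int)
    (res : List String) (es : List (Int × Int × String)) : List String × List (Int × Int × String) :=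
  match es with
  | [] => (res ++ ["O"], [])
  | (s, e2, nm) :: tl =>
    if tstart < s then (res ++ ["O"], (s, e2, nm) :: tl)
    else if tstart = s ∧ pvExtLoopA _tokens tend (i + 1) < e2 then
      (res ++ [String.ofList (['B', '-'] ++ nm.toList)], (s, e2, nm) :: tl)
    else if tstart > s ∧ pvExtLoopA _tokens tend (i + 1) < e2 then
      (res ++ [String.ofList (['I', '-'] ++ nm.toList)], (s, e2, nm) :: tl)
    else if tstart ≥ s ∧ pvExtLoopA _tokens tend (i + 1) = e2 then
      (res ++ [String.ofList (['I', '-'] ++ nm.toList)], tl)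
    else (res, (s, e2, nm) :: tl)

-- the 'if _scheme == 'BILUO'' block
def pvBlockBILUO (_tokens : List String) (i : Nat) (tstart tend : Int)
    (res : List String) (es : List (Int × Int × String)) : List String × List (Int × Int × String) :=
  match es with
  | [] => (res ++ ["O"], [])
  | (s, e2, nm) :: tl =>
    if tstart < s then (res ++ ["O"], (s, e2, nm) :: tl)
    else if tstart = s ∧ pvExtLoopA _tokens tend (i + 1) < e2 then
      (res ++ [String.ofList (['B', '-'] ++ nm.toList)], (s, e2, nm) :: tl)
    else if tstart > s ∧ pvExtLoopA _tokens tend (i + 1) < e2 then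
      (res ++ [String.ofList (['I', '-'] ++ nm.toList)], (s, e2, nm) :: tl)
    else if tstart > s ∧ pvExtLoopA _tokens tend (i + 1) = e2 then
      (res ++ [String.ofList (['L', '-'] ++ nm.toList)], tl)
    else if tstart = s ∧ pvExtLoopA _tokens tend (i + 1) = e2 then
      (res ++ [String.ofList (['U', '-'] ++ nm.toList)], tl)
    else (res, (s, e2, nm) :: tl)

-- 'for i, _t in enumerate(_tokens): …' with state (res, _t_start, whitespaces, _e)
def pvMainA (_tokens : List String) (_scheme : String) :
    Nat → List String → List String → Int → List Int → List (Int × Int × String) → List String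
  | _, [], res, _, _, _ => res
  | i, t :: rem, res, tstart, ws, es =>
    if PySem.Chars.startswith t.toList ['#', '#'] then
      let tend := tstart + ((PySem.List.slice t.toList (some 2) none).length : Int)
      let p := pvSkipWsA tend ws
      pvMainA _tokens _scheme (i + 1) rem (res ++ ["X"]) p.1 p.2 es
    else
      let tend := tstart + (t.toList.length : Int)
      let r1 := if _scheme == "IO" then pvBlockIO _tokens i tstart tend res es else (res, es)
      let r2 := if _scheme == "IOB" then pvBlockIOB _tokens i tstart tend r1.1 r1.2 else r1
      let r3 := if _scheme == "BILUO" then pvBlockBILUO _tokens i tstart tend r2.1 r2.2 else r2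
      let p := pvSkipWsA tend ws
      pvMainA _tokens _scheme (i + 1) rem r3.1 p.1 p.2 r3.2

def ner_entity_to_tagging (_text : String) (_entities : List (Int × Int × String)) (_tokens : List String) (_scheme : String) : List String :=
  let ws := pvWsOf _text
  let stripped := _entities.map (fun ent =>
    let s := pvStripStartA ws ent.1 ent.1 (ent.2.1 - 1)
    let e := pvStripEndA ws ent.2.1 (ent.2.1 - 1) s
    (s, e, ent.2.2))
  let es := pvSortEnts stripped
  let p := pvSkipWsA 0 ws
  pvMainA _tokens _scheme 0 _tokens [] p.1 p.2 es

-- ===== PORT B =====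
-- 'while s <= e - 2 and s in ws_set: s += 1'
def pvStripStartB (wsSet : PySem.Set Int) (s e : Int) : Int :=
  if s ≤ e - 2 ∧ PySem.Set.contains wsSet s then pvStripStartB wsSet (s + 1) e else s
  termination_by (e - 1 - s).toNat
  decreasing_by omega

-- 'while e - 1 >= s + 1 and (e - 1) in ws_set: e -= 1'
def pvStripEndB (wsSet : PySem.Set Int) (s e : Int) : Int :=
  if e - 1 ≥ s + 1 ∧ PySem.Set.contains wsSet (e - 1) then pvStripEndB wsSet s (e - 1) else e
  termination_by (e - 1 - s).toNat
  decreasing_by omega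

-- the suffix-sum list ext (built back to front): ext[i] = '##'-run extension starting at token i
def pvRunList (toks : List String) : List Int :=
  match toks with
  | [] => [0]
  | t :: rest =>
    let r := pvRunList rest
    (if PySem.Chars.startswith t.toList ['#', '#'] then (t.toList.length : Int) - 2 + r.headD 0 else 0) :: r

-- 'while wi < len(ws_sorted) and x == ws_sorted[wi]: x += 1; wi += 1'
def pvSkipWsB (wsS : List Int) (x : Int) (wi : Nat) : Int × Nat :=
  if h : wi < wsS.length then
    if x == wsS[wi] then pvSkipWsB wsS (x + 1) (wi + 1) else (x, wi)
  else (x, wi)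
  termination_by wsS.length - wi

-- 'for t, run_after in zip(_tokens, ext[1:]): …' with state (t_start, wi, ei, res)
def pvMainB (wsS : List Int) (ents : List (Int × Int × String)) (_scheme : String) (known : Bool) :
    List (String × Int) → Int → Nat → Nat → List String → List String
  | [], _, _, _, res => res
  | (t, runAfter) :: rest, tstart, wi, ei, res =>
    if PySem.Chars.startswith t.toList ['#', '#'] then
      let tend := tstart + (t.toList.length : Int) - 2
      let p := pvSkipWsB wsS tend wi
      pvMainB wsS ents _scheme known rest p.1 p.2 ei (res ++ ["X"])
    else
      let tend := tstart + (t.toList.length : Int)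
      let step : List String × Nat :=
        if known then
          match ents[ei]? with
          | none => (res ++ ["O"], ei)
          | some (s, e2, nm) =>
            if tstart < s then (res ++ ["O"], ei)
            else
              let fullEnd := tend + runAfter
              if fullEnd < e2 then
                (res ++ [String.ofList ((if _scheme != "IO" && tstart == s then ['B', '-'] else ['I', '-']) ++ nm.toList)], ei)
              else if fullEnd = e2 then
                (res ++ [String.ofList ((if _scheme == "BILUO" then (if tstart == s then ['U', '-'] else ['L', '-']) else ['I', '-']) ++ nm.toList)], ei + 1)
              else (res, ei)
        else (res, ei)
      let p := pvSkipWsB wsS tend wi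
      pvMainB wsS ents _scheme known rest p.1 p.2 step.2 step.1

def ner_entity_to_tagging_alt (_text : String) (_entities : List (Int × Int × String)) (_tokens : List String) (_scheme : String) : List String :=
  let wsS := pvWsOf _text
  let wsSet := PySem.Set.ofList wsS
  let ents := pvSortEnts (_entities.map (fun ent =>
    let s := pvStripStartB wsSet ent.1 ent.2.1
    let e := pvStripEndB wsSet s ent.2.1
    (s, e, ent.2.2)))
  let ext := pvRunList _tokens
  let known := _scheme == "IO" || _scheme == "IOB" || _scheme == "BILUO"
  let p := pvSkipWsB wsS 0 0
  pvMainB wsS ents _scheme known (_tokens.zip ext.tail) p.1 p.2 0 []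

-- ===== PRECONDITION & SPEC =====
def Spec_ner_entity_to_tagging (_text : String) (_entities : List (Int × Int × String)) (_tokens : List String) (_scheme : String) (out : List String) : Prop := out = ner_entity_to_tagging_alt _text _entities _tokens _scheme
instance (_text : String) (_entities : List (Int × Int × String)) (_tokens : List String) (_scheme : String) (out : List String) : Decidable (Spec_ner_entity_to_tagging _text _entities _tokens _scheme out) := by unfold Spec_ner_entity_to_tagging; infer_instance

-- ===== CLAIM (what is proved, stated in full; the proofs are below) =====
def Claim_equal_ner_entity_to_tagging : Prop := ∀ (_text : String) (_entities : List (Int × Int × String)) (_tokens : List String) (_scheme : String), Dom_ner_entity_to_tagging _text _entities _tokens _scheme → Spec_ner_entity_to_tagging _text _entities _tokens _scheme (ner_entity_to_tagging _text _entities _tokens _scheme)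

-- ===== LEMMAS AND PROOFS =====

lemma pv_contains_ofList (ws : List Int) (i : Int) :
    PySem.Set.contains (PySem.Set.ofList ws) i = ws.contains i := by
  simp only [PySem.Set.contains_eq_listContains]
  by_cases hm : i ∈ ws <;> simp [hm, PySem.Set.mem_ofList]

lemma pv_strip_start_eq (ws : List Int) (s e : Int) :
    pvStripStartA ws s s (e - 1) = pvStripStartB (PySem.Set.ofList ws) s e := by
  fun_induction pvStripStartB (PySem.Set.ofList ws) s e with
  | case1 s hc ih =>
    rw [pvStripStartA]
    rw [pv_contains_ofList] at hc
    simp only [if_pos (show s < e - 1 by omega), hc.2]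
    exact ih
  | case2 s hc =>
    rw [pvStripStartA]
    rw [pv_contains_ofList] at hc
    by_cases h1 : s < e - 1
    · have h2 : s ∉ ws := by
        intro hm
        exact hc ⟨by omega, by simpa using hm⟩
      simp [h1, h2]
    · simp [h1]

lemma pv_strip_end_eq (ws : List Int) (lo e : Int) :
    pvStripEndA ws e (e - 1) lo = pvStripEndB (PySem.Set.ofList ws) lo e := by
  fun_induction pvStripEndB (PySem.Set.ofList ws) lo e with
  | case1 e hc ih =>
    rw [pvStripEndA]
    rw [pv_contains_ofList] at hc
    simp only [if_pos (show lo < e - 1 by omega), hc.2]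
    exact ih
  | case2 e hc =>
    rw [pvStripEndA]
    rw [pv_contains_ofList] at hc
    by_cases h1 : lo < e - 1
    · have h2 : (e - 1) ∉ ws := by
        intro hm
        exact hc ⟨by omega, by simpa using hm⟩
      simp [h1, h2]
    · simp [h1]

lemma pv_len_slice2 (t : List Char) (h : PySem.Chars.startswith t ['#', '#'] = true) :
    ((PySem.List.slice t (some 2) none).length : Int) = (t.length : Int) - 2 := by
  have hp : ['#', '#'] <+: t := (PySem.Chars.startswith_iff t ['#', '#']).1 h
  have hl : 2 ≤ t.length := by simpa using hp.length_le
  rw [PySem.List.slice_from t (by norm_num : (0:Int) ≤ 2)]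
  simp [List.length_drop]
  omega

lemma pv_ext_eq (tokens : List String) (j : Nat) (e : Int) :
    pvExtLoopA tokens e j = e + (pvRunList (tokens.drop j)).headD 0 := by
  fun_induction pvExtLoopA tokens e j with
  | case1 e j hj hs ih =>
    rw [List.drop_eq_getElem_cons hj, pvRunList]
    rw [ih, pv_len_slice2 _ hs]
    simp only [hs, if_pos, List.headD_cons]
    omega
  | case2 e j hj hs =>
    rw [List.drop_eq_getElem_cons hj, pvRunList]
    simp [hs]
  | case3 e j hj =>
    rw [List.drop_of_length_le (by omega)]
    simp [pvRunList]

lemma pv_skip_eq (wsS : List Int) (wi : Nat) (x : Int) :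
    pvSkipWsA x (wsS.drop wi) = ((pvSkipWsB wsS x wi).1, wsS.drop (pvSkipWsB wsS x wi).2) := by
  fun_induction pvSkipWsB wsS x wi with
  | case1 x wi hj hx ih =>
    rw [List.drop_eq_getElem_cons hj, pvSkipWsA]
    simp only [hx, if_pos]
    exact ih
  | case2 x wi hj hx =>
    rw [List.drop_eq_getElem_cons hj, pvSkipWsA]
    simp [hx, ← List.drop_eq_getElem_cons hj]
  | case3 x wi hj =>
    rw [List.drop_of_length_le (by omega)]
    simp [pvSkipWsA]

lemma pv_runList_ne_nil (l : List String) : pvRunList l ≠ [] := by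
  cases l <;> simp [pvRunList]

lemma pv_main_eq (tokens : List String) (scheme : String) (wsS : List Int)
    (ents : List (Int × Int × String)) :
    ∀ (rem : List String) (i : Nat) (res : List String) (tstart : Int) (wi ei : Nat),
      rem = tokens.drop i →
      pvMainA tokens scheme i rem res tstart (wsS.drop wi) (ents.drop ei)
        = pvMainB wsS ents scheme (scheme == "IO" || scheme == "IOB" || scheme == "BILUO")
            (rem.zip (pvRunList rem).tail) tstart wi ei res := by
  intro rem
  induction rem with
  | nil => intro i res tstart wi ei _; simp [pvMainA, pvMainB]
  | cons t rem' ih =>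
    intro i res tstart wi ei hrem
    have hrem' : tokens.drop (i + 1) = rem' := by
      rw [← List.tail_drop, ← hrem]
      rfl
    obtain ⟨c0, r0, hr⟩ : ∃ c0 r0, pvRunList rem' = c0 :: r0 := by
      cases h : pvRunList rem' with
      | nil => exact absurd h (pv_runList_ne_nil rem')
      | cons a b => exact ⟨a, b, rfl⟩
    have hih := fun res tstart wi ei => ih (i + 1) res tstart wi ei hrem'.symm
    simp only [hr, List.tail_cons] at hih
    have hext : ∀ tend : Int, pvExtLoopA tokens tend (i + 1) = tend + c0 := by
      intro tend; rw [pv_ext_eq, hrem', hr]; simp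
    simp only [pvMainA, pvMainB, pvRunList, List.tail_cons, hr, List.zip_cons_cons]
    by_cases hsh : PySem.Chars.startswith t.toList ['#', '#'] = true
    · -- '##' token
      simp only [hsh, if_pos, pv_len_slice2 _ hsh]
      rw [show tstart + ((t.toList.length : Int) - 2) = tstart + (t.toList.length : Int) - 2 by omega]
      rw [pv_skip_eq]
      exact hih _ _ _ _
    · -- ordinary token
      simp only [hsh, Bool.false_eq_true, if_false]
      have hfin : ∀ (res' : List String) (ei' : Nat),
          pvMainA tokens scheme (i + 1) rem' res'
              (pvSkipWsA (tstart + (t.toList.length : Int)) (wsS.drop wi)).1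
              (pvSkipWsA (tstart + (t.toList.length : Int)) (wsS.drop wi)).2 (ents.drop ei')
            = pvMainB wsS ents scheme (scheme == "IO" || scheme == "IOB" || scheme == "BILUO")
                (rem'.zip r0)
                (pvSkipWsB wsS (tstart + (t.toList.length : Int)) wi).1
                (pvSkipWsB wsS (tstart + (t.toList.length : Int)) wi).2 ei' res' := by
        intro res' ei'
        rw [pv_skip_eq]
        exact hih _ _ _ _
      by_cases hio : scheme = "IO"
      · subst hio
        simp only [show (("IO" : String) == "IO") = true by decide,
          show (("IO" : String) == "IOB") = false by decide,
          show (("IO" : String) == "BILUO") = false by decide,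
          show (("IO" : String) != "IO") = false by decide,
          Bool.false_and, Bool.true_or, Bool.false_eq_true, if_false, if_true] at hfin ⊢
        cases hd : ents.drop ei with
        | nil =>
          have hnone : ents[ei]? = none := by
            rw [List.getElem?_eq_none_iff]
            have := List.drop_eq_nil_iff.1 hd
            omega
          simp only [pvBlockIO, hnone]
          rw [← hd]
          exact hfin _ _
        | cons ent tl =>
          obtain ⟨s, e2, nm⟩ := ent
          have hsome : ents[ei]? = some (s, e2, nm) := by
            have h0 : (ents.drop ei)[0]? = some (s, e2, nm) := by rw [hd]; rfl
            rw [List.getElem?_drop] at h0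
            simpa using h0
          have htl : tl = ents.drop (ei + 1) := by
            rw [← List.tail_drop, hd]
            rfl
          simp only [pvBlockIO, hsome, hext]
          split_ifs <;>
            first
              | omega
              | (rw [← hd]; exact hfin _ _)
              | (rw [htl]; exact hfin _ _)
      · by_cases hiob : scheme = "IOB"
        · subst hiob
          simp only [show (("IOB" : String) == "IO") = false by decide,
            show (("IOB" : String) == "IOB") = true by decide,
            show (("IOB" : String) == "BILUO") = false by decide,
            show (("IOB" : String) != "IO") = true by decide,
            Bool.true_and, Bool.false_or, Bool.true_or, Bool.false_eq_true, if_false, if_true] at hfin ⊢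
          cases hd : ents.drop ei with
          | nil =>
            have hnone : ents[ei]? = none := by
              rw [List.getElem?_eq_none_iff]
              have := List.drop_eq_nil_iff.1 hd
              omega
            simp only [pvBlockIOB, hnone]
            rw [← hd]
            exact hfin _ _
          | cons ent tl =>
            obtain ⟨s, e2, nm⟩ := ent
            have hsome : ents[ei]? = some (s, e2, nm) := by
              have h0 : (ents.drop ei)[0]? = some (s, e2, nm) := by rw [hd]; rfl
              rw [List.getElem?_drop] at h0
              simpa using h0
            have htl : tl = ents.drop (ei + 1) := by
              rw [← List.tail_drop, hd]
              rfl
            simp only [pvBlockIOB, hsome, hext, beq_iff_eq]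
            split_ifs <;>
              first
                | omega
                | (rw [← hd]; exact hfin _ _)
                | (rw [htl]; exact hfin _ _)
        · by_cases hbil : scheme = "BILUO"
          · subst hbil
            simp only [show (("BILUO" : String) == "IO") = false by decide,
              show (("BILUO" : String) == "IOB") = false by decide,
              show (("BILUO" : String) == "BILUO") = true by decide,
              show (("BILUO" : String) != "IO") = true by decide,
              Bool.true_and, Bool.false_or, Bool.or_true, Bool.false_eq_true, if_false, if_true] at hfin ⊢
            cases hd : ents.drop ei with
            | nil =>
              have hnone : ents[ei]? = none := by
                rw [List.getElem?_eq_none_iff]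
                have := List.drop_eq_nil_iff.1 hd
                omega
              simp only [pvBlockBILUO, hnone]
              rw [← hd]
              exact hfin _ _
            | cons ent tl =>
              obtain ⟨s, e2, nm⟩ := ent
              have hsome : ents[ei]? = some (s, e2, nm) := by
                have h0 : (ents.drop ei)[0]? = some (s, e2, nm) := by rw [hd]; rfl
                rw [List.getElem?_drop] at h0
                simpa using h0
              have htl : tl = ents.drop (ei + 1) := by
                rw [← List.tail_drop, hd]
                rfl
              simp only [pvBlockBILUO, hsome, hext, beq_iff_eq]
              split_ifs <;>
                first
                  | omega
                  | (rw [← hd]; exact hfin _ _)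
                  | (rw [htl]; exact hfin _ _)
          · have h1 : (scheme == "IO") = false := beq_eq_false_iff_ne.mpr hio
            have h2 : (scheme == "IOB") = false := beq_eq_false_iff_ne.mpr hiob
            have h3 : (scheme == "BILUO") = false := beq_eq_false_iff_ne.mpr hbil
            simp only [h1, h2, h3, Bool.false_or, Bool.false_eq_true, if_false] at hfin ⊢
            exact hfin _ _

-- ===== VERDICT (by name: the statement is the Claim_ definition above) =====
theorem ner_entity_to_tagging_spec : Claim_equal_ner_entity_to_tagging := by
  intro _text _entities _tokens _scheme _hdom
  unfold Spec_ner_entity_to_tagging ner_entity_to_tagging ner_entity_to_tagging_alt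
  dsimp only
  have hstrip : (_entities.map (fun ent =>
        (pvStripStartA (pvWsOf _text) ent.1 ent.1 (ent.2.1 - 1),
         pvStripEndA (pvWsOf _text) ent.2.1 (ent.2.1 - 1)
           (pvStripStartA (pvWsOf _text) ent.1 ent.1 (ent.2.1 - 1)), ent.2.2)))
      = _entities.map (fun ent =>
        (pvStripStartB (PySem.Set.ofList (pvWsOf _text)) ent.1 ent.2.1,
         pvStripEndB (PySem.Set.ofList (pvWsOf _text))
           (pvStripStartB (PySem.Set.ofList (pvWsOf _text)) ent.1 ent.2.1) ent.2.1, ent.2.2)) := by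
    apply List.map_congr_left
    intro ent _
    rw [pv_strip_start_eq, pv_strip_end_eq]
  rw [hstrip]
  have hskip := pv_skip_eq (pvWsOf _text) 0 0
  rw [List.drop_zero] at hskip
  rw [hskip]
  exact pv_main_eq _tokens _scheme (pvWsOf _text) _ _tokens 0 [] _ _ 0 rfl
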